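-- pv_equiv track=rewrite | github.com/jopldataanalyst-DA/PricingModule | pricing_management_system/pricing_system/items.py | apply_search_and_filters
-- ===== SOURCE A (Python) =====
-- SELECTED_COLUMNS = [
--     "sku_code", "item_name", "size", "category", "location",
--     "child_remark", "parent_remark", "item_type",
--     "cost", "price", "catalog", "mrp", "up_price", "cost_into_percent",
--     "available_atp", "fba_stock", "fbf_stock", "sjit_stock", "updated"
-- ]
--
-- def display_value(value):
--     if value is None:
--         return ""
--     return str(value)
--
-- def apply_search_and_filters(items, search="", filters=None, skip_column=None):
--     filtered = items
--     if search:
--         q = search.lower()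
--         filtered = [
--             x for x in filtered
--             if q in str(x.get('sku_code', '')).lower()
--             or q in str(x.get('item_name', '')).lower()
--         ]
--
--     filters = filters or {}
--     for col, values in filters.items():
--         if col == skip_column or col not in SELECTED_COLUMNS:
--             continue
--         if not isinstance(values, list) or not values:
--             continue
--         allowed = {display_value(v) for v in values}
--         filtered = [x for x in filtered if display_value(x.get(col)) in allowed]
--
--     return filtered
-- ===== SOURCE B (Python) =====
-- SELECTED_COLUMNS = [
--     "sku_code", "item_name", "size", "category", "location",
--     "child_remark", "parent_remark", "item_type",
--     "cost", "price", "catalog", "mrp", "up_price", "cost_into_percent",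
--     "available_atp", "fba_stock", "fbf_stock", "sjit_stock", "updated"
-- ]
--
-- def display_value(value):
--     if value is None:
--         return ""
--     return str(value)
--
-- def apply_search_and_filters(items, search="", filters=None, skip_column=None):
--     active = [
--         (col, {display_value(v) for v in values})
--         for col, values in (filters or {}).items()
--         if col != skip_column and col in SELECTED_COLUMNS
--         and isinstance(values, list) and values
--     ]
--     q = search.lower()
--     return [
--         x for x in items
--         if (not search
--             or q in str(x.get('sku_code', '')).lower()
--             or q in str(x.get('item_name', '')).lower())
--         and all(display_value(x.get(col)) in allowed for col, allowed in active)
--     ]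
-- ===== Notes on version B (the rewrite author's own statement) =====
-- stated objective: alternative
-- what changed: B preprocesses the filters dict once into a list of (column, allowed-set) pairs and then keeps items in one single list comprehension whose predicate combines the search test and all column tests, instead of A's 1+f sequential filtering passes each building an intermediate list.
import Mathlib
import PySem

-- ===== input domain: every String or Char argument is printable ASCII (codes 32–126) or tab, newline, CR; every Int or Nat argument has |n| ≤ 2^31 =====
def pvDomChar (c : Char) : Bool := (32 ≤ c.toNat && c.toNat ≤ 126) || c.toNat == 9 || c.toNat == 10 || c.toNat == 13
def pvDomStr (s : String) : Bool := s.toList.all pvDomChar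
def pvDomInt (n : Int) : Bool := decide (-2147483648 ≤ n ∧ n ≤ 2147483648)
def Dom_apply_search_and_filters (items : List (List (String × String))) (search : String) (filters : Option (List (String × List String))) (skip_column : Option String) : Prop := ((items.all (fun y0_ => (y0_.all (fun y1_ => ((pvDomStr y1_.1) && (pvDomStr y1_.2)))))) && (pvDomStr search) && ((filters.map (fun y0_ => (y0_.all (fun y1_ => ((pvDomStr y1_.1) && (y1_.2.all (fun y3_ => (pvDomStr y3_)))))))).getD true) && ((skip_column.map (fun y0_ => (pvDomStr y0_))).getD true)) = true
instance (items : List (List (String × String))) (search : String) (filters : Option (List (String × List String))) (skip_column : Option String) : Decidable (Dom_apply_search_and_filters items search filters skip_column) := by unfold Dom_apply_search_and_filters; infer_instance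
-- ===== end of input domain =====

-- B preprocesses the filters once into (column, allowed-set) pairs and keeps items in a
-- single combined-predicate pass instead of A's 1 + f sequential filtering passes
-- (alternative decomposition; return value only, no mutation in either version).

-- shared module context: SELECTED_COLUMNS and the dict lookup x.get(col, d)
def pvSelectedColumns : List String :=
  ["sku_code", "item_name", "size", "category", "location",
   "child_remark", "parent_remark", "item_type",
   "cost", "price", "catalog", "mrp", "up_price", "cost_into_percent",
   "available_atp", "fba_stock", "fbf_stock", "sjit_stock", "updated"]

-- x.get(col, d) on the row dict (rows and the filters dict are built with Python-dict
-- semantics via PySem.Dict.ofList: duplicate keys overwrite in place)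
def pvRowGetD (x : List (String × String)) (col : String) (d : String) : String :=
  (PySem.Dict.ofList x).getD col d

-- ===== PORT A =====
def apply_search_and_filters (items : List (List (String × String))) (search : String) (filters : Option (List (String × List String))) (skip_column : Option String) : List (List (String × String)) :=
  let filtered := items
  let filtered :=
    if search = "" then filtered
    else
      let q := PySem.Str.lower search
      filtered.filter (fun x =>
        PySem.Str.isIn q (PySem.Str.lower (pvRowGetD x "sku_code" "")) ||
        PySem.Str.isIn q (PySem.Str.lower (pvRowGetD x "item_name" "")))
  let fs := (PySem.Dict.ofList (filters.getD [])).items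
  fs.foldl (fun acc cv =>
    if skip_column = some cv.1 ∨ cv.1 ∉ pvSelectedColumns then acc
    else if cv.2 = [] then acc  -- isinstance(values, list) is always true at type List String
    else
      let allowed : PySem.Set String := PySem.Set.ofList cv.2
      acc.filter (fun x => PySem.Set.contains allowed (pvRowGetD x cv.1 ""))) filtered

-- ===== PORT B =====
def apply_search_and_filters_alt (items : List (List (String × String))) (search : String) (filters : Option (List (String × List String))) (skip_column : Option String) : List (List (String × String)) :=
  let active :=
    (((PySem.Dict.ofList (filters.getD [])).items.filter
        (fun cv => decide (¬ skip_column = some cv.1 ∧ cv.1 ∈ pvSelectedColumns ∧ cv.2 ≠ []))).map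
      (fun cv => (cv.1, (PySem.Set.ofList cv.2 : PySem.Set String))))
  let q := PySem.Str.lower search
  items.filter (fun x =>
    (decide (search = "") ||
     PySem.Str.isIn q (PySem.Str.lower (pvRowGetD x "sku_code" "")) ||
     PySem.Str.isIn q (PySem.Str.lower (pvRowGetD x "item_name" ""))) &&
    active.all (fun ca => PySem.Set.contains ca.2 (pvRowGetD x ca.1 "")))

-- ===== PRECONDITION & SPEC =====
def Spec_apply_search_and_filters (items : List (List (String × String))) (search : String) (filters : Option (List (String × List String))) (skip_column : Option String) (out : List (List (String × String))) : Prop := out = apply_search_and_filters_alt items search filters skip_column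
instance (items : List (List (String × String))) (search : String) (filters : Option (List (String × List String))) (skip_column : Option String) (out : List (List (String × String))) : Decidable (Spec_apply_search_and_filters items search filters skip_column out) := by unfold Spec_apply_search_and_filters; infer_instance

-- ===== CLAIM (what is proved, stated in full; the proofs are below) =====
def Claim_equal_apply_search_and_filters : Prop := ∀ (items : List (List (String × String))) (search : String) (filters : Option (List (String × List String))) (skip_column : Option String), Dom_apply_search_and_filters items search filters skip_column → Spec_apply_search_and_filters items search filters skip_column (apply_search_and_filters items search filters skip_column)

-- ===== LEMMAS AND PROOFS =====

-- A's sequence of filtering passes over the filters list is one filter by the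
-- conjunction of the active column tests.
theorem pvFoldl_filter (skip : Option String) (fs : List (String × List String))
    (l : List (List (String × String))) :
    fs.foldl (fun acc cv =>
      if skip = some cv.1 ∨ cv.1 ∉ pvSelectedColumns then acc
      else if cv.2 = [] then acc
      else
        let allowed : PySem.Set String := PySem.Set.ofList cv.2
        acc.filter (fun x => PySem.Set.contains allowed (pvRowGetD x cv.1 ""))) l
    = l.filter (fun x =>
        (fs.filter (fun cv => decide (¬ skip = some cv.1 ∧ cv.1 ∈ pvSelectedColumns ∧ cv.2 ≠ []))).all
          (fun cv => PySem.Set.contains (PySem.Set.ofList cv.2) (pvRowGetD x cv.1 ""))) := by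
  induction fs generalizing l with
  | nil => simp
  | cons cv fs ih =>
    by_cases h1 : skip = some cv.1 ∨ cv.1 ∉ pvSelectedColumns
    · have hc : (decide (¬ skip = some cv.1 ∧ cv.1 ∈ pvSelectedColumns ∧ cv.2 ≠ [])) = false := by
        simp only [decide_eq_false_iff_not]; tauto
      rw [List.foldl_cons, if_pos h1, ih, List.filter_cons, hc]
      simp only [Bool.false_eq_true, if_false]
    · by_cases h2 : cv.2 = []
      · have hc : (decide (¬ skip = some cv.1 ∧ cv.1 ∈ pvSelectedColumns ∧ cv.2 ≠ [])) = false := by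
          simp only [decide_eq_false_iff_not]; tauto
        rw [List.foldl_cons, if_neg h1, if_pos h2, ih, List.filter_cons, hc]
        simp only [Bool.false_eq_true, if_false]
      · have hc : (decide (¬ skip = some cv.1 ∧ cv.1 ∈ pvSelectedColumns ∧ cv.2 ≠ [])) = true := by
          simp only [decide_eq_true_eq]; tauto
        rw [List.foldl_cons, if_neg h1, if_neg h2, ih, List.filter_filter, List.filter_cons, hc]
        simp [Bool.and_comm]

-- ===== VERDICT (by name: the statement is the Claim_ definition above) =====
theorem apply_search_and_filters_spec : Claim_equal_apply_search_and_filters := by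
  intro items search filters skip_column _
  unfold Spec_apply_search_and_filters apply_search_and_filters apply_search_and_filters_alt
  rw [pvFoldl_filter]
  by_cases hs : search = ""
  · simp [hs, List.all_map, Function.comp]
  · simp [hs, List.filter_filter, List.all_map, Function.comp, Bool.and_comm]
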